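-- pv_equiv track=rewrite | github.com/pollycarp/TuracoFlow | app/modules/rag.py | _parse_policy_metadata
-- ===== SOURCE A (Python) =====
-- def _parse_policy_metadata(text: str, filename: str) -> dict:
--     """Extract country, product_type, policy_code from the document header."""
--     country = "Unknown"
--     product_type = "Unknown"
--     policy_code = "Unknown"
--
--     for line in text.splitlines():
--         line = line.strip()
--         if line.startswith("Country:"):
--             country = line.split(":", 1)[1].strip()
--         elif line.startswith("Product Type:"):
--             product_type = line.split(":", 1)[1].strip()
--         elif line.startswith("Policy Code:"):
--             policy_code = line.split(":", 1)[1].strip()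
--
--     return {"country": country, "product_type": product_type, "policy_code": policy_code}
-- ===== SOURCE B (Python) =====
-- def _parse_policy_metadata(text: str, filename: str) -> dict:
--     """Extract country, product_type, policy_code from the document header."""
--     store = {}
--     for line in text.splitlines():
--         line = line.strip()
--         if ":" in line:
--             key, value = line.split(":", 1)
--             store[key] = value.strip()
--     return {
--         "country": store.get("Country", "Unknown"),
--         "product_type": store.get("Product Type", "Unknown"),
--         "policy_code": store.get("Policy Code", "Unknown"),
--     }
-- ===== Notes on version B (the rewrite author's own statement) =====
-- stated objective: alternative
-- what changed: Instead of three startswith-branches updating three variables, B makes one generic pass that indexes every 'key: value' header line into a dict (last occurrence wins by overwrite) and selects the three fields from the index after the loop.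
import Mathlib
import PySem

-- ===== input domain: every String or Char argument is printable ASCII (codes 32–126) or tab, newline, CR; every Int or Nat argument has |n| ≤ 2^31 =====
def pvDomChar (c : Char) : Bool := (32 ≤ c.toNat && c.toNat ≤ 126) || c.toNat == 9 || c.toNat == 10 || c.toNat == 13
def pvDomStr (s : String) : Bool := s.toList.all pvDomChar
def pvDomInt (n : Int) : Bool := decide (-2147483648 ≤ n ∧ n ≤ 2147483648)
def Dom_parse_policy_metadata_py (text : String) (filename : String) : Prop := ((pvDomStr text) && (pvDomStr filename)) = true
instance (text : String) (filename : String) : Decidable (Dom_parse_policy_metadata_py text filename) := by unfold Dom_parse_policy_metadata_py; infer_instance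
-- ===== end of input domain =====

-- B replaces A's three startswith-branches over three accumulator variables by one generic
-- pass that indexes every "key: value" header line into a dict and selects the three fields
-- afterwards (objective: alternative decomposition, same cost).

-- ===== PORT A =====
-- line.split(":", 1)[1].strip(); in A this is evaluated only under a startswith guard that
-- guarantees a colon, so index 1 always exists and List.getD's default is never used.
def pvValA (line : String) : String :=
  PySem.Str.strip (((PySem.Str.splitMax? line ":" 1).getD []).getD 1 "")

-- the body of A's for-loop: state = (country, product_type, policy_code)
def pvStepA (s : String × String × String) (rawline : String) : String × String × String :=
  let line := PySem.Str.strip rawline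
  if PySem.Str.startswith line "Country:" then (pvValA line, s.2.1, s.2.2)
  else if PySem.Str.startswith line "Product Type:" then (s.1, pvValA line, s.2.2)
  else if PySem.Str.startswith line "Policy Code:" then (s.1, s.2.1, pvValA line)
  else s

def parse_policy_metadata_py (text : String) (filename : String) : List (String × String) :=
  let st := (PySem.Str.splitlines text).foldl pvStepA ("Unknown", "Unknown", "Unknown")
  [("country", st.1), ("product_type", st.2.1), ("policy_code", st.2.2)]

-- ===== PORT B =====
-- the body of B's for-loop: 'key, value = line.split(":", 1); store[key] = value.strip()';
-- the guard ":" in line guarantees the two-element shape, the catch-all arm is unreachable.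
def pvStepB (d : PySem.Dict String String) (rawline : String) : PySem.Dict String String :=
  let line := PySem.Str.strip rawline
  if PySem.Str.isIn ":" line then
    match (PySem.Str.splitMax? line ":" 1).getD [] with
    | [k, v] => d.insert k (PySem.Str.strip v)
    | _ => d
  else d

def parse_policy_metadata_py_alt (text : String) (filename : String) : List (String × String) :=
  let store := (PySem.Str.splitlines text).foldl pvStepB PySem.Dict.empty
  [("country", store.getD "Country" "Unknown"),
   ("product_type", store.getD "Product Type" "Unknown"),
   ("policy_code", store.getD "Policy Code" "Unknown")]

-- ===== PRECONDITION & SPEC =====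
def Spec_parse_policy_metadata_py (text : String) (filename : String) (out : List (String × String)) : Prop := out = parse_policy_metadata_py_alt text filename
instance (text : String) (filename : String) (out : List (String × String)) : Decidable (Spec_parse_policy_metadata_py text filename out) := by unfold Spec_parse_policy_metadata_py; infer_instance

-- ===== CLAIM (what is proved, stated in full; the proofs are below) =====
def Claim_equal_parse_policy_metadata_py : Prop := ∀ (text : String) (filename : String), Dom_parse_policy_metadata_py text filename → Spec_parse_policy_metadata_py text filename (parse_policy_metadata_py text filename)

-- ===== LEMMAS AND PROOFS =====

-- `splitC l` = (the characters before the first ':', the characters after it if any):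
-- a structural handle on both line.split(":", 1) and the startswith guards.
def splitC : List Char → List Char × Option (List Char)
  | [] => ([], none)
  | c :: t => if c = ':' then ([], some t) else
      let r := splitC t
      (c :: r.1, r.2)

theorem pvGo0 (fuel : Nat) (l cur : List Char) (acc : List (List Char)) :
    PySem.Chars.splitOnMax.go [':'] fuel 0 l cur acc = ((cur.reverse ++ l) :: acc).reverse := by
  cases fuel with
  | zero => rw [PySem.Chars.splitOnMax.go]
  | succ n => cases l with
    | nil => rw [PySem.Chars.splitOnMax.go]; simp; omega
    | cons c t => rw [PySem.Chars.splitOnMax.go]; simp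

theorem pvGo1 (fuel : Nat) (l cur : List Char) (acc : List (List Char)) (h : l.length < fuel) :
    PySem.Chars.splitOnMax.go [':'] fuel 1 l cur acc =
      (match splitC l with
       | (k, none) => ((cur.reverse ++ k) :: acc).reverse
       | (k, some r) => (r :: (cur.reverse ++ k) :: acc).reverse) := by
  induction fuel generalizing l cur acc with
  | zero => omega
  | succ n ih =>
    cases l with
    | nil => rw [PySem.Chars.splitOnMax.go]; simp [splitC]; omega
    | cons c t =>
      rw [PySem.Chars.splitOnMax.go]
      by_cases hc : c = ':'
      · subst hc
        simp [splitC, pvGo0]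
      · have hpre : [':'].isPrefixOf (c :: t) = false := by
          simp [List.isPrefixOf]; exact fun hh => absurd hh.symm hc
        simp only [splitC, if_neg hc, hpre, Bool.false_eq_true, if_false, Nat.succ_ne_zero]
        rw [ih t (c :: cur) acc (by simpa using Nat.lt_of_succ_lt_succ h)]
        rcases hsp : splitC t with ⟨k, _|r⟩ <;> simp

-- line.split(":", 1) through splitC
theorem pvSplit1 (line : String) :
    (PySem.Str.splitMax? line ":" 1).getD [] =
      (match splitC line.toList with
       | (k, none) => [String.ofList k]
       | (k, some r) => [String.ofList k, String.ofList r]) := by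
  have h : (":".toList) = [':'] := by decide
  simp only [PySem.Str.splitMax?, h, PySem.Chars.splitMax?, PySem.Chars.splitOnMax,
    show [':'].isEmpty = false from rfl, show ((1:Int) < 0) = False from by norm_num,
    Int.toNat_one, Bool.false_eq_true, if_false]
  rw [pvGo1 (line.toList.length + 1) line.toList [] [] (by omega)]
  rcases hsp : splitC line.toList with ⟨k, _|r⟩ <;> simp

theorem pvMemColon (l : List Char) : ':' ∈ l ↔ ((splitC l).2.isSome = true) := by
  induction l with
  | nil => simp [splitC]
  | cons c t ih =>
    by_cases hc : c = ':'
    · subst hc; simp [splitC]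
    · simp [splitC, hc, ih, Ne.symm hc]

theorem pvIsIn (line : String) :
    PySem.Str.isIn ":" line = (splitC line.toList).2.isSome := by
  have h : PySem.Str.isIn ":" line = true ↔ ':' ∈ line.toList := by
    rw [PySem.Str.isIn_iff_infix, show (":".toList) = [':'] from by decide]
    exact List.singleton_infix_iff ':' line.toList
  rcases hb : (splitC line.toList).2.isSome with _ | _
  · rw [Bool.eq_false_iff]
    intro hh
    rw [(pvMemColon _).mp (h.mp hh)] at hb; cases hb
  · exact h.mpr ((pvMemColon _).mpr hb)

-- startswith (X ++ ":") through splitC, for a prefix X that contains no colon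
theorem pvPrefix (l : List Char) (X : List Char) (hX : ':' ∉ X) :
    PySem.Chars.startswith l (X ++ [':']) =
      ((splitC l).2.isSome && decide ((splitC l).1 = X)) := by
  induction l generalizing X with
  | nil =>
    cases X <;> simp [PySem.Chars.startswith, splitC]
  | cons c t ih =>
    by_cases hc : c = ':'
    · subst hc
      cases X with
      | nil => simp [PySem.Chars.startswith, splitC, List.isPrefixOf]
      | cons x X' =>
        have hx : x ≠ ':' := fun h => hX (h ▸ List.mem_cons_self)
        simp [PySem.Chars.startswith, splitC, List.isPrefixOf, hx]
    · cases X with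
      | nil => simp [PySem.Chars.startswith, splitC, List.isPrefixOf, hc]; exact fun h => hc h.symm
      | cons x X' =>
        have hX' : ':' ∉ X' := fun h => hX (List.mem_cons_of_mem _ h)
        have := ih X' hX'
        simp only [PySem.Chars.startswith, List.isPrefixOf, List.cons_append] at this ⊢
        simp [splitC, hc, this]
        by_cases hxc : x = c
        · subst hxc; simp
        · simp [Ne.symm hxc, hxc]
  
-- the per-line correspondence: A's branch update matches B's dict insert
theorem pvStep (s : String × String × String) (d : PySem.Dict String String) (rawline : String)
    (h1 : s.1 = d.getD "Country" "Unknown")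
    (h2 : s.2.1 = d.getD "Product Type" "Unknown")
    (h3 : s.2.2 = d.getD "Policy Code" "Unknown") :
    (pvStepA s rawline).1 = (pvStepB d rawline).getD "Country" "Unknown" ∧
    (pvStepA s rawline).2.1 = (pvStepB d rawline).getD "Product Type" "Unknown" ∧
    (pvStepA s rawline).2.2 = (pvStepB d rawline).getD "Policy Code" "Unknown" := by
  unfold pvStepA pvStepB
  set line := PySem.Str.strip rawline with hline
  rcases hsp : splitC line.toList with ⟨k, o⟩
  have hofl : ∀ (cs : List Char) (w : String), (String.ofList cs = w) ↔ (cs = w.toList) := by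
    intro cs w
    constructor
    · intro h; rw [← h]; simp
    · intro h; rw [h]; simp
  have hin : PySem.Str.isIn ":" line = o.isSome := by rw [pvIsIn, hsp]
  have e1 : PySem.Str.startswith line "Country:" = (o.isSome && decide (k = "Country".toList)) := by
    have := pvPrefix line.toList "Country".toList (by decide)
    rw [hsp] at this
    simpa [PySem.Str.startswith, show ("Country:".toList) = "Country".toList ++ [':'] from by decide] using this
  have e2 : PySem.Str.startswith line "Product Type:" = (o.isSome && decide (k = "Product Type".toList)) := by
    have := pvPrefix line.toList "Product Type".toList (by decide)
    rw [hsp] at this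
    simpa [PySem.Str.startswith, show ("Product Type:".toList) = "Product Type".toList ++ [':'] from by decide] using this
  have e3 : PySem.Str.startswith line "Policy Code:" = (o.isSome && decide (k = "Policy Code".toList)) := by
    have := pvPrefix line.toList "Policy Code".toList (by decide)
    rw [hsp] at this
    simpa [PySem.Str.startswith, show ("Policy Code:".toList) = "Policy Code".toList ++ [':'] from by decide] using this
  cases o with
  | none =>
    simp only [e1, e2, e3, hin, Option.isSome_none, Bool.false_and, Bool.false_eq_true,
      if_false]
    exact ⟨h1, h2, h3⟩
  | some r =>
    have hsplit : (PySem.Str.splitMax? line ":" 1).getD [] = [String.ofList k, String.ofList r] := by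
      rw [pvSplit1, hsp]
    have hval : pvValA line = PySem.Str.strip (String.ofList r) := by
      unfold pvValA; rw [hsplit]; rfl
    simp only [e1, e2, e3, hin, Option.isSome_some, Bool.true_and, hsplit, hval]
    by_cases k1 : k = "Country".toList
    · have hk1 : String.ofList k = "Country" := (hofl k "Country").mpr k1
      simp [k1, PySem.Dict.getD_insert, h2, h3,
        show ¬("Product Type" = "Country") from by decide,
        show ¬("Policy Code" = "Country") from by decide]
    · by_cases k2 : k = "Product Type".toList
      · have hk2 : String.ofList k = "Product Type" := (hofl k "Product Type").mpr k2
        simp [k2, PySem.Dict.getD_insert, h1, h3,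
          show ¬("Country" = "Product Type") from by decide,
          show ¬("Policy Code" = "Product Type") from by decide]
      · by_cases k3 : k = "Policy Code".toList
        · have hk3 : String.ofList k = "Policy Code" := (hofl k "Policy Code").mpr k3
          simp [k3, PySem.Dict.getD_insert, h1, h2,
            show ¬("Country" = "Policy Code") from by decide,
            show ¬("Product Type" = "Policy Code") from by decide]
        · have n1 : ¬ ("Country" = String.ofList k) := fun h => k1 ((hofl k "Country").mp h.symm)
          have n2 : ¬ ("Product Type" = String.ofList k) := fun h => k2 ((hofl k "Product Type").mp h.symm)
          have n3 : ¬ ("Policy Code" = String.ofList k) := fun h => k3 ((hofl k "Policy Code").mp h.symm)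
          simp [show ¬ k = ['C','o','u','n','t','r','y'] from k1,
            show ¬ k = ['P','r','o','d','u','c','t',' ','T','y','p','e'] from k2,
            show ¬ k = ['P','o','l','i','c','y',' ','C','o','d','e'] from k3,
            PySem.Dict.getD_insert, n1, n2, n3, h1, h2, h3]

theorem pvFold (lines : List String) (d : PySem.Dict String String) (s : String × String × String)
    (h1 : s.1 = d.getD "Country" "Unknown")
    (h2 : s.2.1 = d.getD "Product Type" "Unknown")
    (h3 : s.2.2 = d.getD "Policy Code" "Unknown") :
    (lines.foldl pvStepA s).1 = (lines.foldl pvStepB d).getD "Country" "Unknown" ∧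
    (lines.foldl pvStepA s).2.1 = (lines.foldl pvStepB d).getD "Product Type" "Unknown" ∧
    (lines.foldl pvStepA s).2.2 = (lines.foldl pvStepB d).getD "Policy Code" "Unknown" := by
  induction lines generalizing d s with
  | nil => exact ⟨h1, h2, h3⟩
  | cons line rest ih =>
    obtain ⟨g1, g2, g3⟩ := pvStep s d line h1 h2 h3
    simp only [List.foldl_cons]
    exact ih (pvStepB d line) (pvStepA s line) g1 g2 g3

-- ===== VERDICT (by name: the statement is the Claim_ definition above) =====
theorem parse_policy_metadata_py_spec : Claim_equal_parse_policy_metadata_py := by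
  intro text filename _
  unfold Spec_parse_policy_metadata_py parse_policy_metadata_py parse_policy_metadata_py_alt
  obtain ⟨g1, g2, g3⟩ := pvFold (PySem.Str.splitlines text) PySem.Dict.empty
    ("Unknown", "Unknown", "Unknown")
    (by simp [PySem.Dict.getD, PySem.Dict.get?_empty])
    (by simp [PySem.Dict.getD, PySem.Dict.get?_empty])
    (by simp [PySem.Dict.getD, PySem.Dict.get?_empty])
  simp only [g1, g2, g3]
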